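-- pv_equiv track=rewrite | github.com/adrianprochaska/adventofcode_2025 | 03_ex.py | largest_joltage
-- ===== SOURCE A (Python) =====
-- def find_max_digit(num_str, start_idx, end_idx, direction):
--     max_digit = 0
--     max_idx = start_idx
--     for idx in range(start_idx, end_idx, direction):
--         current_digit = int(num_str[idx])
--         if current_digit >= max_digit:
--             max_digit = current_digit
--             max_idx = idx
--
--     return max_digit, max_idx
--
-- def largest_joltage(num_str, jolt_size=2):
--     start_idx = len(num_str) - 1
--     step = -1
--     end_idx = -1
--     start_num = 0
--
--     digit_ary = []
--     left_idx = -1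
--     for n_loop in range(jolt_size):
--         right_idx = len(num_str) - (jolt_size - n_loop)
--         max_digit, left_idx = find_max_digit(num_str, right_idx, left_idx, -1)
--
--         digit_ary.append(max_digit)
--
--     joltage_output = 0
--     ten_power = jolt_size
--     for elm in digit_ary:
--         ten_power -= 1
--         joltage_output += elm * 10 ** (ten_power)
--
--     return joltage_output
-- ===== SOURCE B (Python) =====
-- def largest_joltage(num_str, jolt_size=2):
--     # Single forward monotonic-stack pass instead of repeated window scans.
--     if jolt_size <= 0:
--         return 0
--     n = len(num_str)
--     stack = []
--     for i, ch in enumerate(num_str):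
--         d = int(ch)
--         rem = n - i  # digits still available, including this one
--         while stack and stack[-1] < d and len(stack) - 1 + rem >= jolt_size:
--             stack.pop()
--         stack.append(d)
--     joltage_output = 0
--     for d in stack[:jolt_size]:
--         joltage_output = joltage_output * 10 + d
--     return joltage_output
-- ===== Notes on version B (the rewrite author's own statement) =====
-- stated objective: faster
-- what changed: Replaces the per-output-digit rightward window rescans (find_max_digit over an index range for each of the jolt_size picks) with a single forward monotonic-stack pass that pops a smaller top while enough digits remain to still reach jolt_size, then folds the first jolt_size stack entries into the integer.
-- intended difference: For jolt_size >= len(num_str)+2 (still short of where A raises IndexError) with at least one nonzero digit among the last jolt_size-len-1 digits, A re-reads those digits through negative-index wraparound and returns extra leading copies of them, while B returns the number formed from all available digits — the intended largest joltage when fewer digits exist than requested (with an all-zero wrapped tail the padding is invisible and A = B). — e.g. on largest_joltage("1", 3): A returns 11, B returns 1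
import Mathlib
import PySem

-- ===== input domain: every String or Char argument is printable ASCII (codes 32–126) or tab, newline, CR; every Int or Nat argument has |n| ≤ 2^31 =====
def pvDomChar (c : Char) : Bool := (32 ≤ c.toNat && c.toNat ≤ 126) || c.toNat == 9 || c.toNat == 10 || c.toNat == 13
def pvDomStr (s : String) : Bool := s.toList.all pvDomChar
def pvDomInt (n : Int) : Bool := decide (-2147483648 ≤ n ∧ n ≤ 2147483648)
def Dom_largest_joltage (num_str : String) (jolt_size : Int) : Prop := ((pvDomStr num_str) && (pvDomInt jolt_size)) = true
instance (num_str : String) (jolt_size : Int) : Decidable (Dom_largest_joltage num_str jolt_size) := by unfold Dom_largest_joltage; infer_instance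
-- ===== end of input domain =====

-- B replaces A's per-pick rightward window rescans by one forward monotonic-stack pass (O(n·k) → O(n)).

-- ===== PORT A =====
def find_max_digit (num_str : String) (start_idx end_idx direction : Int) : Int × Int :=
  (PySem.List.pyRange start_idx end_idx direction).foldl
    (fun st idx =>
      -- current_digit = int(num_str[idx]); the .getD 0 defaults are unreachable under Pre_
      let current_digit : Int :=
        ((PySem.Str.pyGet? num_str idx).bind
          (fun ch => PySem.Int.ofStr? (String.ofList [ch]))).getD 0
      if st.1 ≤ current_digit then (current_digit, idx) else st)
    (0, start_idx)

def largest_joltage (num_str : String) (jolt_size : Int) : Int :=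
  -- A's locals start_idx/step/end_idx/start_num are assigned but never used
  let st := (PySem.List.pyRange 0 jolt_size 1).foldl
    (fun (st : List Int × Int) n_loop =>
      let right_idx := PySem.Str.len num_str - (jolt_size - n_loop)
      let fm := find_max_digit num_str right_idx st.2 (-1)
      (st.1 ++ [fm.1], fm.2))
    ([], -1)
  -- joltage loop: ten_power is ≥ 0 at every executed '10 ** ten_power', so .toNat is exact
  let fin := st.1.foldl
    (fun (acc : Int × Int) elm => (acc.1 + elm * 10 ^ (acc.2 - 1).toNat, acc.2 - 1))
    (0, jolt_size)
  fin.1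

-- ===== PORT B =====
-- stack is kept top-first (Python's stack[-1]/append/pop at the right end become the head)
def popLoop (jolt_size rem d : Int) : List Int → List Int
  | [] => []
  | t :: s => if t < d ∧ jolt_size ≤ ((t :: s).length : Int) - 1 + rem then popLoop jolt_size rem d s else t :: s

def largest_joltage_alt (num_str : String) (jolt_size : Int) : Int :=
  if jolt_size ≤ 0 then 0
  else
    let n : Int := PySem.Str.len num_str
    let stack := (num_str.toList.zipIdx).foldl
      (fun (stack : List Int) p =>
        let d : Int := (PySem.Int.ofStr? (String.ofList [p.1])).getD 0  -- int(ch); a digit under Pre_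
        let rem : Int := n - (p.2 : Int)
        d :: popLoop jolt_size rem d stack) []
    (stack.reverse.take jolt_size.toNat).foldl (fun acc d => acc * 10 + d) 0

-- ===== PRECONDITION & SPEC =====
-- Pre_ excludes exactly the inputs on which A raises: with jolt_size ≥ 1, a string with a non-digit
-- character (ValueError from int()) and jolt_size ≥ 2*len+2, where A's negative indices run past -len
-- (IndexError); for jolt_size ≤ 0 A reads nothing and returns 0, so every string is admitted there.
def Pre_largest_joltage (num_str : String) (jolt_size : Int) : Prop :=
  jolt_size ≤ 0 ∨
  (num_str.toList.all PySem.Chars.isdigit = true ∧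
   jolt_size ≤ 2 * (num_str.toList.length : Int) + 1)
instance (num_str : String) (jolt_size : Int) : Decidable (Pre_largest_joltage num_str jolt_size) := by
  unfold Pre_largest_joltage; infer_instance

def pvWitness_largest_joltage : String × Int := ("3925", 2)

-- For jolt_size ≥ len(num_str)+2 (still short of the region where A raises), A pads its picks by re-reading
-- the last jolt_size-len-1 digits through negative-index wraparound; when any of those wrapped digits is
-- nonzero A returns a value with extra leading copies of trailing digits, while B returns the number formed
-- from all available digits — the intended value when fewer digits exist than requested.
def D_largest_joltage (num_str : String) (jolt_size : Int) : Prop :=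
  (num_str.toList.length : Int) + 2 ≤ jolt_size ∧
  ∃ c ∈ num_str.toList.drop (2 * num_str.toList.length + 1 - jolt_size.toNat), c ≠ '0' 
instance (num_str : String) (jolt_size : Int) : Decidable (D_largest_joltage num_str jolt_size) := by
  unfold D_largest_joltage; infer_instance

def Spec_largest_joltage (num_str : String) (jolt_size : Int) (out : Int) : Prop :=
  ¬ D_largest_joltage num_str jolt_size → out = largest_joltage_alt num_str jolt_size
instance (num_str : String) (jolt_size : Int) (out : Int) : Decidable (Spec_largest_joltage num_str jolt_size out) := by
  unfold Spec_largest_joltage; infer_instance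

def pvDiffWitness_largest_joltage : String × Int := ("1", 3)
def pvDiffWitnessOut_largest_joltage : Int × Int := (11, 1)

-- ===== CLAIM (what is proved, stated in full; the proofs are below) =====
def Claim_unchanged_largest_joltage : Prop := ∀ (num_str : String) (jolt_size : Int), Dom_largest_joltage num_str jolt_size → Pre_largest_joltage num_str jolt_size → Spec_largest_joltage num_str jolt_size (largest_joltage num_str jolt_size)
def Claim_exact_largest_joltage : Prop := ∀ (num_str : String) (jolt_size : Int), Dom_largest_joltage num_str jolt_size → Pre_largest_joltage num_str jolt_size → D_largest_joltage num_str jolt_size → largest_joltage num_str jolt_size ≠ largest_joltage_alt num_str jolt_size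
def Claim_changed_largest_joltage : Prop := Dom_largest_joltage (pvDiffWitness_largest_joltage.1) (pvDiffWitness_largest_joltage.2) ∧ Pre_largest_joltage (pvDiffWitness_largest_joltage.1) (pvDiffWitness_largest_joltage.2) ∧ D_largest_joltage (pvDiffWitness_largest_joltage.1) (pvDiffWitness_largest_joltage.2) ∧ largest_joltage (pvDiffWitness_largest_joltage.1) (pvDiffWitness_largest_joltage.2) = pvDiffWitnessOut_largest_joltage.1 ∧ largest_joltage_alt (pvDiffWitness_largest_joltage.1) (pvDiffWitness_largest_joltage.2) = pvDiffWitnessOut_largest_joltage.2 ∧ pvDiffWitnessOut_largest_joltage.1 ≠ pvDiffWitnessOut_largest_joltage.2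

-- ===== LEMMAS AND PROOFS =====

-- digit value of a digit character
def dv (c : Char) : Int := (c.toNat : Int) - 48

theorem digit_int (c : Char) (h : PySem.Chars.isdigit c = true) :
    PySem.Int.ofStr? (String.ofList [c]) = some (dv c) := by
  have h' := h
  simp [PySem.Chars.isdigit, Char.le_def, UInt32.le_iff_toNat_le] at h'
  obtain ⟨h1, h2⟩ := h'
  have h1' : 48 ≤ c.toNat := h1
  have h2' : c.toNat ≤ 57 := h2
  have hc : c = Char.ofNat c.toNat := (Char.ofNat_toNat c).symm
  interval_cases hcc : c.toNat <;> rw [hc] <;> decide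

-- digit list of the string
def dstr (num_str : String) : List Int := num_str.toList.map dv

-- indexing with a (nonnegative, in-range) Int index
def getI (xs : List Int) (i : Int) : Int := xs.getD i.toNat 0

-- abstract form of A's find_max_digit scan
def fmA (xs : List Int) (right left : Int) : Int × Int :=
  (PySem.List.pyRange right left (-1)).foldl
    (fun st idx => if st.1 ≤ getI xs idx then (getI xs idx, idx) else st)
    (0, right)

-- split a nonempty list at its leftmost maximum
def maxSplit : List Int → List Int × Int × List Int
  | [] => ([], 0, [])
  | [d] => ([], d, [])
  | d :: e :: ds =>
      let r := maxSplit (e :: ds)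
      if r.2.1 ≤ d then ([], d, e :: ds) else (d :: r.1, r.2.1, r.2.2)

-- repeated leftmost-max greedy pick (the common mathematical core)
def greedy : Nat → List Int → List Int
  | 0, _ => []
  | r+1, ys =>
      let ms := maxSplit (ys.take (ys.length - r))
      ms.2.1 :: greedy r (ys.drop (ms.1.length + 1))

-- A's outer loop, abstracted: r picks remaining, left = last picked index
def arec (xs : List Int) : Nat → Int → List Int × Int
  | 0, left => ([], left)
  | r+1, left =>
      let f := fmA xs ((xs.length : Int) - ((r : Int) + 1)) left
      let rest := arec xs r f.2
      (f.1 :: rest.1, rest.2)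

-- B's stack pass, abstracted (stack top-first)
def runStack (k : Int) : List Int → List Int → List Int
  | S, [] => S
  | S, d :: ys => runStack k (d :: popLoop k ((ys.length : Int) + 1) d S) ys

theorem maxSplit_spec (w : List Int) (hw : w ≠ []) :
    w = (maxSplit w).1 ++ (maxSplit w).2.1 :: (maxSplit w).2.2 ∧
    (∀ x ∈ (maxSplit w).1, x < (maxSplit w).2.1) ∧
    (∀ x ∈ (maxSplit w).2.2, x ≤ (maxSplit w).2.1) := by
  induction w using maxSplit.induct with
  | case1 => simp at hw
  | case2 d => simp [maxSplit]
  | case3 d e ds r hle ih =>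
      obtain ⟨hdec, hu, hv⟩ := ih (by simp)
      have hms : maxSplit (d :: e :: ds) = ([], d, e :: ds) := by
        simp only [maxSplit]
        rw [if_pos hle]
      rw [hms]
      refine ⟨by simp, by simp, ?_⟩
      intro x hx
      rw [hdec] at hx
      rcases List.mem_append.1 hx with hx | hx
      · exact le_trans (le_of_lt (hu x hx)) hle
      · rcases List.mem_cons.1 hx with rfl | hx
        · exact hle
        · exact le_trans (hv x hx) hle
  | case4 d e ds r hle ih =>
      obtain ⟨hdec, hu, hv⟩ := ih (by simp)
      have hms : maxSplit (d :: e :: ds) =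
          (d :: (maxSplit (e :: ds)).1, (maxSplit (e :: ds)).2.1, (maxSplit (e :: ds)).2.2) := by
        simp only [maxSplit]
        rw [if_neg hle]
      rw [hms]
      refine ⟨by simpa using hdec, ?_, hv⟩
      intro x hx
      rcases List.mem_cons.1 hx with rfl | hx
      · exact not_le.mp hle
      · exact hu x hx

theorem greedy_length (r : Nat) (ys : List Int) : (greedy r ys).length = r := by
  induction r generalizing ys with
  | zero => simp [greedy]
  | succ r ih => simp [greedy, ih]

theorem greedy_all (ys : List Int) : greedy ys.length ys = ys := by
  induction ys with
  | nil => simp [greedy]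
  | cons d t ih =>
      have h1 : t.length + 1 - t.length = 1 := by omega
      simp only [List.length_cons, greedy, h1, List.take_succ_cons, List.take_zero]
      simp only [maxSplit]
      simpa using ih

-- Horner fold and its shift law
def horner (l : List Int) (a : Int) : Int := l.foldl (fun acc d => acc * 10 + d) a

theorem horner_shift (l : List Int) (a : Int) :
    horner l a = a * 10 ^ l.length + horner l 0 := by
  induction l generalizing a with
  | nil => simp [horner]
  | cons d t ih =>
      have h1 : horner (d :: t) a = horner t (a * 10 + d) := rfl
      have h2 : horner (d :: t) 0 = horner t d := by simp [horner]
      rw [h1, h2, ih (a * 10 + d), ih d]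
      simp [List.length_cons, pow_succ]
      ring

theorem pow_fold (l : List Int) (acc : Int) :
    (l.foldl (fun (p : Int × Int) elm => (p.1 + elm * 10 ^ (p.2 - 1).toNat, p.2 - 1))
      (acc, (l.length : Int))).1 = acc + horner l 0 := by
  induction l generalizing acc with
  | nil => simp [horner]
  | cons d t ih =>
      have hcast : ((d :: t).length : Int) - 1 = (t.length : Int) := by simp
      have htn : ((t.length : Int)).toNat = t.length := by omega
      simp only [List.foldl_cons, hcast, htn]
      rw [ih]
      have : horner (d :: t) 0 = horner t d := by simp [horner]
      rw [this, horner_shift t d]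
      ring

-- ==== A-side lemmas ====

theorem fmA_eq (num_str : String) (h : ∀ c ∈ num_str.toList, PySem.Chars.isdigit c = true)
    (right left : Int) (hl : -1 ≤ left) (hr : right < (num_str.toList.length : Int)) :
    find_max_digit num_str right left (-1) = fmA (dstr num_str) right left := by
  unfold find_max_digit fmA
  apply PySem.List.foldl_congr_mem
  intro acc idx hidx
  rw [PySem.List.mem_pyRange_neg_one] at hidx
  obtain ⟨hgt, hle⟩ := hidx
  have h0 : 0 ≤ idx := by omega
  have hlt : idx.toNat < num_str.toList.length := by omega
  have hget : PySem.Str.pyGet? num_str idx = some (num_str.toList[idx.toNat]) := by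
    simp only [pysem]
    rw [PySem.List.pyGet?_of_nonneg _ h0]
    exact List.getElem?_eq_getElem hlt
  have hc := digit_int _ (h _ (List.getElem_mem hlt))
  have hdig : ((PySem.Str.pyGet? num_str idx).bind
      (fun ch => PySem.Int.ofStr? (String.ofList [ch]))).getD 0 = dv (num_str.toList[idx.toNat]) := by
    rw [hget]
    simp only [Option.bind_some]
    rw [hc]
    rfl
  have hgetI : getI (dstr num_str) idx = dv (num_str.toList[idx.toNat]) := by
    unfold getI dstr
    rw [List.getD_eq_getElem _ _ (by simpa using hlt)]
    simp
  simp only [hdig, hgetI]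

theorem fmA_snd_ge (xs : List Int) (right left : Int) (hl : -1 ≤ left) (hr : -1 ≤ right) :
    -1 ≤ (fmA xs right left).2 := by
  have aux : ∀ (L : List Int) (st : Int × Int), -1 ≤ st.2 → (∀ i ∈ L, -1 ≤ i) →
      -1 ≤ (L.foldl (fun st idx => if st.1 ≤ getI xs idx then (getI xs idx, idx) else st) st).2 := by
    intro L
    induction L with
    | nil => intro st h _; exact h
    | cons i L ihL =>
        intro st h hm
        simp only [List.foldl_cons]
        split_ifs with hc
        · exact ihL _ (hm i (by simp)) (fun x hx => hm x (List.mem_cons_of_mem _ hx))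
        · exact ihL _ h (fun x hx => hm x (List.mem_cons_of_mem _ hx))
  apply aux _ _ hr
  intro i hi
  rw [PySem.List.mem_pyRange_neg_one] at hi
  omega

theorem fm_core (xs : List Int) (hx : ∀ x ∈ xs, 0 ≤ x) :
    ∀ (len : Nat) (a b : Int), 1 ≤ len → 0 ≤ a → a + (len : Int) ≤ (xs.length : Int) →
    (PySem.List.pyRange a (a + (len : Int)) 1).foldr
      (fun idx st => if st.1 ≤ getI xs idx then (getI xs idx, idx) else st) (0, b)
    = ((maxSplit ((xs.drop a.toNat).take len)).2.1,
       a + ((maxSplit ((xs.drop a.toNat).take len)).1.length : Int)) := by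
  intro len
  induction len with
  | zero => intro a b h; omega
  | succ L ih =>
      intro a b _ ha hlen
      have halt : a.toNat < xs.length := by omega
      have hdropc : xs.drop a.toNat = xs[a.toNat] :: xs.drop (a.toNat + 1) :=
        List.drop_eq_getElem_cons halt
      have hgetIa : getI xs a = xs[a.toNat] := by
        unfold getI
        rw [List.getD_eq_getElem _ _ halt]
      rcases Nat.eq_zero_or_pos L with hL0 | hL1
      · subst hL0
        rw [show a + ((0 + 1 : Nat) : Int) = a + 1 by norm_num, PySem.List.pyRange_one_singleton]
        have h0 : (0 : Int) ≤ getI xs a := by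
          rw [hgetIa]
          exact hx _ (List.getElem_mem halt)
        simp only [List.foldr_cons, List.foldr_nil]
        rw [if_pos h0, hdropc, List.take_succ_cons, List.take_zero]
        simp [maxSplit, hgetIa]
      · have hcons : PySem.List.pyRange a (a + ((L + 1 : Nat) : Int)) 1
            = a :: PySem.List.pyRange (a + 1) ((a + 1) + (L : Int)) 1 := by
          rw [PySem.List.pyRange_one_cons (by push_cast; omega)]
          congr 1
          push_cast
          ring_nf
        rw [hcons, List.foldr_cons, ih (a + 1) b hL1 (by omega)
          (by push_cast at hlen ⊢; omega)]
        have htn : (a + 1).toNat = a.toNat + 1 := by omega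
        have hseg : (xs.drop a.toNat).take (L + 1)
            = xs[a.toNat] :: ((xs.drop (a + 1).toNat).take L) := by
          rw [hdropc, List.take_succ_cons, htn]
        obtain ⟨e, ds, hE⟩ : ∃ e ds, (xs.drop (a + 1).toNat).take L = e :: ds := by
          cases hEE : (xs.drop (a + 1).toNat).take L with
          | nil =>
              exfalso
              have := congrArg List.length hEE
              simp [htn] at this
              omega
          | cons e ds => exact ⟨e, ds, rfl⟩
        rw [hseg, hE]
        have hms : maxSplit (xs[a.toNat] :: e :: ds)
            = if (maxSplit (e :: ds)).2.1 ≤ xs[a.toNat]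
              then ([], xs[a.toNat], e :: ds)
              else (xs[a.toNat] :: (maxSplit (e :: ds)).1,
                    (maxSplit (e :: ds)).2.1, (maxSplit (e :: ds)).2.2) := by
          simp only [maxSplit]
        by_cases hcmp : (maxSplit (e :: ds)).2.1 ≤ xs[a.toNat]
        · rw [if_pos (by rw [hgetIa]; exact hcmp), hms, if_pos hcmp]
          simp [hgetIa]
        · rw [if_neg (by rw [hgetIa]; exact hcmp), hms, if_neg hcmp]
          rw [Prod.ext_iff]
          refine ⟨rfl, ?_⟩
          simp only [List.length_cons]
          push_cast
          ring

theorem fmA_max (xs : List Int) (len : Nat) (left : Int) (hlen : 1 ≤ len)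
    (hl : -1 ≤ left) (hr : left + 1 + (len : Int) ≤ (xs.length : Int))
    (hx : ∀ x ∈ xs, 0 ≤ x) :
    fmA xs (left + (len : Int)) left =
      ((maxSplit ((xs.drop (left + 1).toNat).take len)).2.1,
       left + 1 + ((maxSplit ((xs.drop (left + 1).toNat).take len)).1.length : Int)) := by
  unfold fmA
  rw [PySem.List.pyRange_neg_one_eq_reverse, List.foldl_reverse]
  rw [show left + (len : Int) + 1 = (left + 1) + (len : Int) by ring]
  rw [fm_core xs hx len (left + 1) (left + (len : Int)) hlen (by omega) (by omega)]

theorem arec_greedy (xs : List Int) (hx : ∀ x ∈ xs, 0 ≤ x) :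
    ∀ (r : Nat) (left : Int), -1 ≤ left → left + 1 + (r : Int) ≤ (xs.length : Int) →
    (arec xs r left).1 = greedy r (xs.drop (left + 1).toNat) := by
  intro r
  induction r with
  | zero => intro left _ _; simp [arec, greedy]
  | succ r ih =>
      intro left hl hle
      have hp : ((left + 1).toNat : Int) = left + 1 := by omega
      have hlen : 1 ≤ xs.length - (left + 1).toNat - r := by omega
      have hright : (xs.length : Int) - ((r : Int) + 1)
          = left + ((xs.length - (left + 1).toNat - r : Nat) : Int) := by omega
      simp only [arec]
      rw [hright, fmA_max xs (xs.length - (left + 1).toNat - r) left hlen hl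
        (by omega) hx]
      have hys_len : (xs.drop (left + 1).toNat).length = xs.length - (left + 1).toNat := by
        simp
      have hwin : (xs.drop (left + 1).toNat).length - r
          = xs.length - (left + 1).toNat - r := by omega
      simp only [greedy, hys_len]
      have hwne : (xs.drop (left + 1).toNat).take (xs.length - (left + 1).toNat - r) ≠ [] := by
        intro hnil
        have := congrArg List.length hnil
        simp at this
        omega
      obtain ⟨hdec, hu, hv⟩ := maxSplit_spec _ hwne
      have hulen : (maxSplit ((xs.drop (left + 1).toNat).take
            (xs.length - (left + 1).toNat - r))).1.length + 1
          ≤ xs.length - (left + 1).toNat - r := by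
        have := congrArg List.length hdec
        simp at this
        omega
      congr 1
      rw [ih (left + 1 + ((maxSplit ((xs.drop (left + 1).toNat).take
            (xs.length - (left + 1).toNat - r))).1.length : Int)) (by omega)
        (by omega)]
      congr 1
      rw [List.drop_drop]
      congr 1
      omega

theorem outer_loop (num_str : String) (jolt_size : Int)
    (h : ∀ c ∈ num_str.toList, PySem.Chars.isdigit c = true)
    (hk : jolt_size ≤ (num_str.toList.length : Int) + 1) :
    ∀ (r : Nat) (ary : List Int) (left : Int), -1 ≤ left → (r : Int) ≤ jolt_size →
    (PySem.List.pyRange (jolt_size - (r : Int)) jolt_size 1).foldl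
      (fun (st : List Int × Int) n_loop =>
        (st.1 ++ [(find_max_digit num_str (PySem.Str.len num_str - (jolt_size - n_loop)) st.2 (-1)).1],
         (find_max_digit num_str (PySem.Str.len num_str - (jolt_size - n_loop)) st.2 (-1)).2))
      (ary, left)
    = (ary ++ (arec (dstr num_str) r left).1, (arec (dstr num_str) r left).2) := by
  intro r
  induction r with
  | zero =>
      intro ary left _ _
      rw [show jolt_size - ((0 : Nat) : Int) = jolt_size by norm_num]
      rw [PySem.List.pyRange_one_eq_nil (by omega)]
      simp [arec]
  | succ r ih =>
      intro ary left hl hr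
      have hcons : PySem.List.pyRange (jolt_size - ((r + 1 : Nat) : Int)) jolt_size 1
          = (jolt_size - ((r : Int) + 1)) :: PySem.List.pyRange (jolt_size - (r : Int)) jolt_size 1 := by
        rw [show jolt_size - ((r + 1 : Nat) : Int) = jolt_size - ((r : Int) + 1) by push_cast; ring]
        rw [PySem.List.pyRange_one_cons (by push_cast at hr ⊢; omega)]
        congr 1
        ring_nf
      rw [hcons, List.foldl_cons]
      dsimp only
      have hstr : PySem.Str.len num_str = (num_str.toList.length : Int) := by
        simp [pysem]
      have hridx : PySem.Str.len num_str - (jolt_size - (jolt_size - ((r : Int) + 1)))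
          = (num_str.toList.length : Int) - ((r : Int) + 1) := by rw [hstr]; omega
      rw [hridx]
      rw [fmA_eq num_str h _ _ hl (by omega)]
      have hxl : ((dstr num_str).length : Int) = (num_str.toList.length : Int) := by
        simp [dstr]
      simp only [arec, hxl]
      rw [ih (ary ++ [(fmA (dstr num_str) ((num_str.toList.length : Int) - ((r : Int) + 1)) left).1])
        ((fmA (dstr num_str) ((num_str.toList.length : Int) - ((r : Int) + 1)) left).2)
        (fmA_snd_ge _ _ _ hl (by push_cast at hr ⊢; omega)) (by push_cast at hr ⊢; omega)]
      simp

-- ==== B-side lemmas ====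

theorem popLoop_mem (k rem d : Int) (S : List Int) :
    ∀ x ∈ popLoop k rem d S, x ∈ S := by
  induction S with
  | nil => simp [popLoop]
  | cons t s ih =>
      intro x hx
      simp only [popLoop] at hx
      split_ifs at hx with hc
      · exact List.mem_cons_of_mem _ (ih x hx)
      · exact hx

theorem popLoop_all (k rem d : Int) (S : List Int)
    (h : ∀ x ∈ S, x < d) (hrem : k ≤ rem) : popLoop k rem d S = [] := by
  induction S with
  | nil => simp [popLoop]
  | cons t s ih =>
      have ht : t < d := h t (by simp)
      have hg : k ≤ ((t :: s).length : Int) - 1 + rem := by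
        simp only [List.length_cons]
        push_cast
        omega
      simp only [popLoop, if_pos (And.intro ht hg)]
      exact ih (fun x hx => h x (List.mem_cons_of_mem _ hx))

theorem popLoop_none (k rem d : Int) (S : List Int)
    (h : (S.length : Int) - 1 + rem < k) : popLoop k rem d S = S := by
  cases S with
  | nil => simp [popLoop]
  | cons t s =>
      have : ¬ (t < d ∧ k ≤ ((t :: s).length : Int) - 1 + rem) := by
        intro ⟨_, hg⟩
        omega
      simp only [popLoop]
      rw [if_neg this]

theorem popLoop_shift (k rem d m : Int) (S : List Int)
    (h : k ≤ rem → d ≤ m) : popLoop k rem d (S ++ [m]) = popLoop (k - 1) rem d S ++ [m] := by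
  induction S with
  | nil =>
      simp only [List.nil_append, popLoop]
      split_ifs with hc
      · obtain ⟨hmd, hg⟩ := hc
        simp only [List.length_cons, List.length_nil] at hg
        have : d ≤ m := h (by push_cast at hg ⊢; omega)
        omega
      · rfl
  | cons t s ih =>
      simp only [List.cons_append, popLoop]
      have hcond : (t < d ∧ k ≤ ((t :: (s ++ [m])).length : Int) - 1 + rem) ↔
          (t < d ∧ k - 1 ≤ ((t :: s).length : Int) - 1 + rem) := by
        constructor <;> rintro ⟨h1, h2⟩ <;> refine ⟨h1, ?_⟩ <;>
          simp only [List.length_cons, List.length_append, List.length_nil] at h2 ⊢ <;>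
          push_cast at h2 ⊢ <;> omega
      by_cases hc : t < d ∧ k - 1 ≤ ((t :: s).length : Int) - 1 + rem
      · rw [if_pos (hcond.2 hc), if_pos hc]
        exact ih
      · rw [if_neg (fun hx => hc (hcond.1 hx)), if_neg hc]
        simp

theorem runStack_nopop (k : Int) (ys S : List Int)
    (h : (S.length : Int) + (ys.length : Int) ≤ k) :
    runStack k S ys = ys.reverse ++ S := by
  induction ys generalizing S with
  | nil => simp [runStack]
  | cons d ys ih =>
      simp only [runStack]
      rw [popLoop_none]
      · rw [ih]
        · simp
        · simp at h ⊢; omega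
      · simp at h ⊢; omega

theorem runStack_crush (k m : Int) (t : List Int) :
    ∀ (u S : List Int), (∀ x ∈ u, x < m) → (∀ x ∈ S, x < m) →
    (k ≤ (t.length : Int) + 1) →
    runStack k S (u ++ m :: t) = runStack k [m] t := by
  intro u
  induction u with
  | nil =>
      intro S hu hS hk
      simp only [List.nil_append, runStack]
      rw [popLoop_all _ _ _ _ hS (by omega)]
  | cons a u ih =>
      intro S hu hS hk
      simp only [List.cons_append, runStack]
      apply ih _ (fun x hx => hu x (List.mem_cons_of_mem _ hx))
      · intro x hx
        rcases List.mem_cons.1 hx with rfl | hx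
        · exact hu x (by simp)
        · exact hS x (popLoop_mem _ _ _ _ x hx)
      · exact hk

theorem runStack_shift (k m : Int) :
    ∀ (ys S : List Int),
    (∀ (j : Nat), j < ys.length → k ≤ (ys.length : Int) - (j : Int) → ys.getD j 0 ≤ m) →
    runStack k (S ++ [m]) ys = runStack (k - 1) S ys ++ [m] := by
  intro ys
  induction ys with
  | nil => intro S h; simp [runStack]
  | cons d ys ih =>
      intro S h
      simp only [runStack]
      rw [popLoop_shift]
      · rw [show (d :: (popLoop (k - 1) ((ys.length : Int) + 1) d S ++ [m]))
              = (d :: popLoop (k - 1) ((ys.length : Int) + 1) d S) ++ [m] from rfl]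
        apply ih
        intro j hj hkj
        have := h (j + 1) (by simpa using Nat.succ_lt_succ hj)
          (by simp only [List.length_cons] at hkj ⊢; push_cast at hkj ⊢; omega)
        simpa using this
      · intro hk
        have := h 0 (by simp)
          (by simp only [List.length_cons] at hk ⊢; push_cast at hk ⊢; omega)
        simpa using this

theorem runStack_greedy : ∀ (r : Nat) (ys : List Int), 1 ≤ r → r ≤ ys.length →
    (runStack (r : Int) [] ys).reverse.take r = greedy r ys := by
  intro r
  induction r with
  | zero => intro ys h; omega
  | succ r ih =>
      intro ys _ hlen
      have hwne : ys.take (ys.length - r) ≠ [] := by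
        have h1 : 1 ≤ ys.length - r := by omega
        intro hnil
        have := congrArg List.length hnil
        simp at this
        omega
      obtain ⟨hdec, hu, hv⟩ := maxSplit_spec (ys.take (ys.length - r)) hwne
      set u := (maxSplit (ys.take (ys.length - r))).1 with hu'
      set m := (maxSplit (ys.take (ys.length - r))).2.1 with hm'
      set v := (maxSplit (ys.take (ys.length - r))).2.2 with hv'
      have hrest : (ys.drop (ys.length - r)).length = r := by
        simp
        omega
      have hys : ys = u ++ m :: (v ++ ys.drop (ys.length - r)) := by
        conv_lhs => rw [← List.take_append_drop (ys.length - r) ys]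
        rw [hdec]
        simp
      have hwlen : (ys.take (ys.length - r)).length = ys.length - r := by
        simp
      have hulen : u.length + 1 + v.length = ys.length - r := by
        have := congrArg List.length hdec
        simp at this
        omega
      have h1 : runStack ((r + 1 : Nat) : Int) [] ys
          = runStack ((r + 1 : Nat) : Int) [m] (v ++ ys.drop (ys.length - r)) := by
        conv_lhs => rw [hys]
        exact runStack_crush _ m _ u [] hu (by simp)
          (by simp only [List.length_append, hrest]; push_cast; omega)
      have h2 : runStack ((r + 1 : Nat) : Int) [m] (v ++ ys.drop (ys.length - r))
          = runStack (((r + 1 : Nat) : Int) - 1) [] (v ++ ys.drop (ys.length - r)) ++ [m] := by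
        have := runStack_shift ((r + 1 : Nat) : Int) m (v ++ ys.drop (ys.length - r)) []
        rw [List.nil_append] at this
        apply this
        intro j hj hk
        have hjv : j < v.length := by
          simp only [List.length_append, hrest] at hk hj
          push_cast at hk
          omega
        rw [List.getD_append _ _ _ _ hjv]
        have : v.getD j 0 ∈ v := by
          rw [List.getD_eq_getElem v 0 hjv]
          exact List.getElem_mem hjv
        exact hv _ this
      have hcast : (((r + 1 : Nat) : Int) - 1) = (r : Int) := by push_cast; ring
      rw [h1, h2, hcast, List.reverse_append, List.reverse_singleton, List.singleton_append,
        List.take_succ_cons]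
      have hdrop : ys.drop (u.length + 1) = v ++ ys.drop (ys.length - r) := by
        conv_lhs => rw [hys, show u ++ m :: (v ++ ys.drop (ys.length - r))
            = (u ++ [m]) ++ (v ++ ys.drop (ys.length - r)) by simp]
        rw [show u.length + 1 = (u ++ [m]).length by simp]
        exact List.drop_left
      have hgr : greedy (r + 1) ys = m :: greedy r (v ++ ys.drop (ys.length - r)) := by
        rw [← hdrop]
        rfl
      rw [hgr]
      rcases Nat.eq_zero_or_pos r with hr0 | hr1
      · subst hr0
        simp [greedy]
      · rw [ih _ hr1 (by simp only [List.length_append, hrest]; omega)]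

theorem enum_fold (num_str : String) (jolt_size : Int)
    (_h : ∀ c ∈ num_str.toList, PySem.Chars.isdigit c = true) :
    ∀ (l : List Char) (j : Nat) (S : List Int), (∀ c ∈ l, PySem.Chars.isdigit c = true) →
    (j : Int) + (l.length : Int) = (PySem.Str.len num_str : Int) →
    (l.zipIdx j).foldl
      (fun (stack : List Int) p =>
        (PySem.Int.ofStr? (String.ofList [p.1])).getD 0 ::
          popLoop jolt_size (PySem.Str.len num_str - (p.2 : Int))
            ((PySem.Int.ofStr? (String.ofList [p.1])).getD 0) stack) S
    = runStack jolt_size S (l.map dv) := by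
  intro l
  induction l with
  | nil => intro j S _ _; rfl
  | cons c l ih =>
      intro j S hdig hlen
      rw [List.zipIdx_cons, List.foldl_cons]
      simp only [List.map_cons, runStack]
      have hd : (PySem.Int.ofStr? (String.ofList [c])).getD 0 = dv c := by
        rw [digit_int c (hdig c (by simp))]
        rfl
      have hrem : PySem.Str.len num_str - (j : Int) = (l.length : Int) + 1 := by
        simp only [List.length_cons] at hlen
        push_cast at hlen ⊢
        omega
      rw [hd, hrem]
      have hmaplen : ((l.map dv).length : Int) = (l.length : Int) := by simp
      rw [hmaplen]
      apply ih
      · exact fun c' hc' => hdig c' (List.mem_cons_of_mem _ hc')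
      · simp only [List.length_cons] at hlen
        push_cast at hlen ⊢
        omega

-- ==== wraparound band (len+2 ≤ jolt_size ≤ 2*len+1) ====

theorem horner_append (a b : List Int) (x : Int) : horner (a ++ b) x = horner b (horner a x) := by
  simp [horner, List.foldl_append]

theorem horner_zero_cons (l : List Int) : horner ((0 : Int) :: l) 0 = horner l 0 := by
  simp [horner]

theorem horner_of_zeros (l : List Int) (h : ∀ x ∈ l, x = 0) : horner l 0 = 0 := by
  induction l with
  | nil => rfl
  | cons d t ih =>
      have hd : d = 0 := h d (by simp)
      have : horner ((0 : Int) :: t) 0 = horner t 0 := horner_zero_cons t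
      rw [hd, this, ih (fun x hx => h x (List.mem_cons_of_mem _ hx))]

theorem horner_ge_init (l : List Int) (hl : ∀ x ∈ l, 0 ≤ x) :
    ∀ a : Int, 0 ≤ a → a ≤ horner l a := by
  induction l with
  | nil => intro a _; simp [horner]
  | cons d t ih =>
      intro a ha
      have hd : 0 ≤ d := hl d (by simp)
      have h1 : a ≤ a * 10 + d := by omega
      have h2 : a * 10 + d ≤ horner t (a * 10 + d) :=
        ih (fun x hx => hl x (List.mem_cons_of_mem _ hx)) _ (by omega)
      calc a ≤ a * 10 + d := h1
        _ ≤ horner t (a * 10 + d) := h2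
        _ = horner (d :: t) a := rfl

theorem horner_pos (l : List Int) (hl : ∀ x ∈ l, 0 ≤ x) :
    ∀ a : Int, 0 ≤ a → (0 < a ∨ ∃ x ∈ l, 0 < x) → 0 < horner l a := by
  induction l with
  | nil =>
      intro a _ h
      rcases h with h | ⟨x, hx, _⟩
      · simpa [horner] using h
      · simp at hx
  | cons d t ih =>
      intro a ha h
      have hd : 0 ≤ d := hl d (by simp)
      have htail := fun x hx => hl x (List.mem_cons_of_mem _ hx)
      show 0 < horner t (a * 10 + d)
      rcases h with h | ⟨x, hx, hxpos⟩
      · exact ih htail _ (by omega) (Or.inl (by omega))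
      · rcases List.mem_cons.1 hx with rfl | hx
        · exact ih htail _ (by omega) (Or.inl (by omega))
        · exact ih htail _ (by omega) (Or.inr ⟨x, hx, hxpos⟩)

theorem dv_pos_of_ne_zero (c : Char) (h : PySem.Chars.isdigit c = true) (h0 : c ≠ '0') :
    1 ≤ dv c := by
  simp [PySem.Chars.isdigit, Char.le_def, UInt32.le_iff_toNat_le] at h
  have h1 : 48 ≤ c.toNat := h.1
  have hne : c.toNat ≠ 48 := by
    intro he
    apply h0
    have := Char.ofNat_toNat c
    rw [he] at this
    exact this.symm
  unfold dv
  omega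

-- A's find_max_digit over the empty range
theorem fm_empty (num_str : String) (right : Int) (h : right ≤ -1) :
    find_max_digit num_str right (-1) (-1) = (0, right) := by
  unfold find_max_digit
  rw [PySem.List.pyRange_neg_one_eq_nil h]
  rfl

-- A's find_max_digit over a singleton window [i], i possibly negative (wraparound read)
theorem fm_singleton (num_str : String)
    (h : ∀ c ∈ num_str.toList, PySem.Chars.isdigit c = true) (i : Int)
    (h1 : -(num_str.toList.length : Int) ≤ i) (h2 : i < (num_str.toList.length : Int)) :
    find_max_digit num_str i (i - 1) (-1)
      = (getI (dstr num_str ++ dstr num_str) (i + (num_str.toList.length : Int)), i) := by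
  have hdv : ∀ c ∈ num_str.toList, 0 ≤ dv c := by
    intro c hc
    have hd := h c hc
    simp [PySem.Chars.isdigit, Char.le_def, UInt32.le_iff_toNat_le] at hd
    have h1 : 48 ≤ c.toNat := hd.1
    unfold dv
    omega
  unfold find_max_digit
  have hr : PySem.List.pyRange i (i - 1) (-1) = [i] := by
    rw [PySem.List.pyRange_neg_one_cons (by omega)]
    rw [PySem.List.pyRange_neg_one_eq_nil (by omega)]
  rw [hr]
  simp only [List.foldl_cons, List.foldl_nil]
  rcases le_or_gt 0 i with hpos | hneg
  · have hlt : i.toNat < num_str.toList.length := by omega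
    have hget : PySem.Str.pyGet? num_str i = some (num_str.toList[i.toNat]) := by
      simp only [pysem]
      rw [PySem.List.pyGet?_of_nonneg _ hpos]
      exact List.getElem?_eq_getElem hlt
    have hc := digit_int _ (h _ (List.getElem_mem hlt))
    have hdig1 : ((PySem.Str.pyGet? num_str i).bind
        (fun ch => PySem.Int.ofStr? (String.ofList [ch]))).getD 0
        = dv (num_str.toList[i.toNat]) := by
      rw [hget]
      simp only [Option.bind_some]
      rw [hc]
      rfl
    have hgetI : getI (dstr num_str ++ dstr num_str) (i + (num_str.toList.length : Int))
        = dv (num_str.toList[i.toNat]) := by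
      unfold getI dstr
      have htn : (i + (num_str.toList.length : Int)).toNat
          = num_str.toList.length + i.toNat := by omega
      rw [htn, List.getD_eq_getElem _ _
        (by simp only [List.length_append, List.length_map]; omega)]
      rw [List.getElem_append_right (by simp only [List.length_map]; omega)]
      simp
    simp only [hdig1, hgetI]
    rw [if_pos (by simpa using hdv _ (List.getElem_mem hlt))]
  · have hk1 : 0 < (-i).toNat := by omega
    have hk2 : (-i).toNat ≤ num_str.toList.length := by omega
    have hlt : num_str.toList.length - (-i).toNat < num_str.toList.length := by omega
    have hget : PySem.Str.pyGet? num_str i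
        = some (num_str.toList[num_str.toList.length - (-i).toNat]) := by
      simp only [pysem]
      conv_lhs => rw [show i = -((((-i).toNat : Nat)) : Int) by omega]
      rw [PySem.List.pyGet?_neg_natCast _ _ hk1 hk2]
      exact List.getElem?_eq_getElem hlt
    have hc := digit_int _ (h _ (List.getElem_mem hlt))
    have hdig1 : ((PySem.Str.pyGet? num_str i).bind
        (fun ch => PySem.Int.ofStr? (String.ofList [ch]))).getD 0
        = dv (num_str.toList[num_str.toList.length - (-i).toNat]) := by
      rw [hget]
      simp only [Option.bind_some]
      rw [hc]
      rfl
    have hgetI : getI (dstr num_str ++ dstr num_str) (i + (num_str.toList.length : Int))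
        = dv (num_str.toList[num_str.toList.length - (-i).toNat]) := by
      unfold getI dstr
      have htn : (i + (num_str.toList.length : Int)).toNat
          = num_str.toList.length - (-i).toNat := by omega
      rw [htn, List.getD_eq_getElem _ _
        (by simp only [List.length_append, List.length_map]; omega)]
      rw [List.getElem_append_left (by simp only [List.length_map]; omega)]
      simp
    simp only [hdig1, hgetI]
    rw [if_pos (by simpa using hdv _ (List.getElem_mem hlt))]

-- the loop tail of A in the band: every remaining window is the singleton [n - r]
theorem singleton_phase (num_str : String) (jolt_size : Int)
    (h : ∀ c ∈ num_str.toList, PySem.Chars.isdigit c = true) :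
    ∀ (r : Nat) (ary : List Int), (r : Int) ≤ jolt_size - 1 →
      (r : Int) ≤ 2 * (num_str.toList.length : Int) →
    (PySem.List.pyRange (jolt_size - (r : Int)) jolt_size 1).foldl
      (fun (st : List Int × Int) n_loop =>
        (st.1 ++ [(find_max_digit num_str (PySem.Str.len num_str - (jolt_size - n_loop)) st.2 (-1)).1],
         (find_max_digit num_str (PySem.Str.len num_str - (jolt_size - n_loop)) st.2 (-1)).2))
      (ary, (num_str.toList.length : Int) - (r : Int) - 1)
    = (ary ++ (dstr num_str ++ dstr num_str).drop (2 * num_str.toList.length - r),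
       (num_str.toList.length : Int) - 1) := by
  have hstr : PySem.Str.len num_str = (num_str.toList.length : Int) := by simp [pysem]
  have hlen2 : (dstr num_str ++ dstr num_str).length = 2 * num_str.toList.length := by
    simp [dstr]
    omega
  intro r
  induction r with
  | zero =>
      intro ary _ _
      rw [show jolt_size - ((0 : Nat) : Int) = jolt_size by norm_num]
      rw [PySem.List.pyRange_one_eq_nil le_rfl]
      simp only [List.foldl_nil]
      rw [List.drop_of_length_le (by omega)]
      simp
  | succ r ih =>
      intro ary hr1 hr2
      have hr2' : r + 1 ≤ 2 * num_str.toList.length := by exact_mod_cast hr2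
      have hcons : PySem.List.pyRange (jolt_size - ((r + 1 : Nat) : Int)) jolt_size 1
          = (jolt_size - ((r : Int) + 1)) :: PySem.List.pyRange (jolt_size - (r : Int)) jolt_size 1 := by
        rw [show jolt_size - ((r + 1 : Nat) : Int) = jolt_size - ((r : Int) + 1) by push_cast; ring]
        rw [PySem.List.pyRange_one_cons (by push_cast at hr1 ⊢; omega)]
        congr 1
        ring_nf
      rw [hcons, List.foldl_cons]
      dsimp only
      rw [show PySem.Str.len num_str - (jolt_size - (jolt_size - ((r : Int) + 1)))
          = (num_str.toList.length : Int) - ((r : Int) + 1) by rw [hstr]; omega]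
      rw [show (num_str.toList.length : Int) - ((r + 1 : Nat) : Int) - 1
          = ((num_str.toList.length : Int) - ((r : Int) + 1)) - 1 by push_cast; ring]
      rw [fm_singleton num_str h _ (by omega) (by omega)]
      have hidx : (2 : Nat) * num_str.toList.length - (r + 1) < (dstr num_str ++ dstr num_str).length := by
        omega
      have hdropc : (dstr num_str ++ dstr num_str).drop (2 * num_str.toList.length - (r + 1))
          = (dstr num_str ++ dstr num_str)[2 * num_str.toList.length - (r + 1)]
            :: (dstr num_str ++ dstr num_str).drop (2 * num_str.toList.length - r) := by
        rw [List.drop_eq_getElem_cons hidx,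
          show 2 * num_str.toList.length - (r + 1) + 1 = 2 * num_str.toList.length - r
            from by omega]
      have hgetW : getI (dstr num_str ++ dstr num_str)
          ((num_str.toList.length : Int) - ((r : Int) + 1) + (num_str.toList.length : Int))
          = (dstr num_str ++ dstr num_str)[2 * num_str.toList.length - (r + 1)] := by
        unfold getI
        have htn : ((num_str.toList.length : Int) - ((r : Int) + 1)
            + (num_str.toList.length : Int)).toNat = 2 * num_str.toList.length - (r + 1) := by
          omega
        rw [htn, List.getD_eq_getElem _ _ hidx]
      have hleft : (num_str.toList.length : Int) - ((r : Int) + 1)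
          = (num_str.toList.length : Int) - (r : Int) - 1 := by ring
      rw [hgetW, hleft, ih _ (by push_cast at hr1 ⊢; omega) (by push_cast at hr2 ⊢; omega)]
      rw [hdropc]
      simp

-- A's value in the band
theorem band_eval (num_str : String) (jolt_size : Int)
    (h : ∀ c ∈ num_str.toList, PySem.Chars.isdigit c = true)
    (h1 : (num_str.toList.length : Int) + 2 ≤ jolt_size)
    (h2 : jolt_size ≤ 2 * (num_str.toList.length : Int) + 1) :
    largest_joltage num_str jolt_size
      = horner ((dstr num_str ++ dstr num_str).drop
          (2 * num_str.toList.length + 1 - jolt_size.toNat)) 0 := by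
  have hstr : PySem.Str.len num_str = (num_str.toList.length : Int) := by simp [pysem]
  have hxlen : (dstr num_str).length = num_str.toList.length := by simp [dstr]
  simp only [largest_joltage]
  rw [PySem.List.pyRange_one_cons (by omega : (0 : Int) < jolt_size), List.foldl_cons]
  dsimp only
  rw [show PySem.Str.len num_str - (jolt_size - 0)
      = (num_str.toList.length : Int) - jolt_size by rw [hstr]; omega]
  rw [fm_empty _ _ (by omega)]
  dsimp only
  simp only [List.nil_append]
  have hph := singleton_phase num_str jolt_size h ((jolt_size - 1).toNat) [(0 : Int)]
    (by omega) (by omega)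
  rw [show (((jolt_size - 1).toNat : Nat) : Int) = jolt_size - 1 by omega] at hph
  rw [show jolt_size - (jolt_size - 1) = 0 + 1 by ring] at hph
  rw [show (num_str.toList.length : Int) - (jolt_size - 1) - 1
      = (num_str.toList.length : Int) - jolt_size by ring] at hph
  rw [show 2 * num_str.toList.length - (jolt_size - 1).toNat
      = 2 * num_str.toList.length + 1 - jolt_size.toNat by omega] at hph
  rw [hph]
  simp only [List.singleton_append]
  have hlen : ((0 : Int) :: (dstr num_str ++ dstr num_str).drop
      (2 * num_str.toList.length + 1 - jolt_size.toNat)).length = jolt_size.toNat := by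
    simp only [List.length_cons, List.length_drop, List.length_append, dstr,
      List.length_map]
    omega
  conv_lhs => rw [show ((0 : Int), jolt_size)
    = ((0 : Int), ((((0 : Int) :: (dstr num_str ++ dstr num_str).drop
        (2 * num_str.toList.length + 1 - jolt_size.toNat)).length : Nat) : Int)) by
      rw [hlen, Int.toNat_of_nonneg (by omega : (0 : Int) ≤ jolt_size)]]
  rw [pow_fold]
  rw [horner_zero_cons]
  simp

-- B's value whenever no pop can ever fire (len ≤ jolt_size)
theorem alt_nopop (num_str : String) (jolt_size : Int)
    (h : ∀ c ∈ num_str.toList, PySem.Chars.isdigit c = true)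
    (h1 : (num_str.toList.length : Int) ≤ jolt_size) (h2 : 0 < jolt_size) :
    largest_joltage_alt num_str jolt_size = horner (dstr num_str) 0 := by
  have hstr : PySem.Str.len num_str = (num_str.toList.length : Int) := by simp [pysem]
  simp only [largest_joltage_alt]
  rw [if_neg (by omega)]
  have henum := enum_fold num_str jolt_size h num_str.toList 0 [] h
    (by rw [hstr]; push_cast; omega)
  rw [henum, runStack_nopop jolt_size _ []
    (by simp only [List.length_nil, List.length_map]; push_cast; omega)]
  simp only [List.append_nil, List.reverse_reverse]
  rw [List.take_of_length_le (by simp only [List.length_map]; omega)]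
  rfl

-- the wrapped tail is a genuine suffix of the digit string
theorem band_split (num_str : String) (jolt_size : Int)
    (h1 : (num_str.toList.length : Int) + 1 ≤ jolt_size) :
    (dstr num_str ++ dstr num_str).drop (2 * num_str.toList.length + 1 - jolt_size.toNat)
      = (dstr num_str).drop (2 * num_str.toList.length + 1 - jolt_size.toNat) ++ dstr num_str := by
  have hxlen : (dstr num_str).length = num_str.toList.length := by simp [dstr]
  exact List.drop_append_of_le_length (by rw [hxlen]; omega)

-- ===== VERDICT =====
theorem largest_joltage_spec : Claim_unchanged_largest_joltage := by
  intro num_str jolt_size hdom hpre hnd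
  unfold D_largest_joltage at hnd
  have hxlen : (dstr num_str).length = num_str.toList.length := by simp [dstr]
  have hstr : PySem.Str.len num_str = (num_str.toList.length : Int) := by simp [pysem]
  rcases le_or_gt jolt_size 0 with hc0 | hc1
  · -- jolt_size ≤ 0 : both sides are 0
    simp only [largest_joltage, largest_joltage_alt]
    rw [PySem.List.pyRange_one_eq_nil hc0, if_pos hc0]
    simp
  · -- 1 ≤ jolt_size : the all-digits branch of Pre_ applies
    obtain ⟨hdig0, hk2⟩ := hpre.resolve_left (by omega)
    have hdig : ∀ c ∈ num_str.toList, PySem.Chars.isdigit c = true := by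
      simpa [List.all_eq_true] using hdig0
    rcases le_or_gt jolt_size ((num_str.toList.length : Int) + 1) with hle1 | hband
    · -- jolt_size ≤ len + 1
      simp only [largest_joltage, largest_joltage_alt]
      rw [if_neg (by omega)]
      have hx : ∀ x ∈ dstr num_str, 0 ≤ x := by
        intro x hxm
        obtain ⟨c, hc, rfl⟩ := List.mem_map.1 hxm
        have hd := hdig c hc
        simp [PySem.Chars.isdigit, Char.le_def, UInt32.le_iff_toNat_le] at hd
        have h1 : 48 ≤ c.toNat := hd.1
        unfold dv
        omega
      have hkr : ((jolt_size.toNat : Int)) = jolt_size := Int.toNat_of_nonneg (by omega)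
      have henum := enum_fold num_str jolt_size hdig num_str.toList 0 [] hdig
        (by rw [hstr]; push_cast; omega)
      rcases le_or_gt jolt_size (num_str.toList.length : Int) with hcn | hcnn
      · -- 1 ≤ jolt_size ≤ len : the greedy case
        have houter := outer_loop num_str jolt_size hdig (by omega) jolt_size.toNat [] (-1)
          (by norm_num) (by omega)
        rw [show jolt_size - (jolt_size.toNat : Int) = 0 by omega] at houter
        rw [houter]
        have harec := arec_greedy (dstr num_str) hx jolt_size.toNat (-1) (by norm_num)
          (by push_cast; omega)
        rw [show ((-1 : Int) + 1).toNat = 0 from rfl, List.drop_zero] at harec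
        rw [harec, henum]
        simp only [List.nil_append]
        conv_rhs => rw [← hkr]
        rw [Int.toNat_natCast]
        rw [runStack_greedy jolt_size.toNat (num_str.toList.map dv) (by omega)
          (by rw [List.length_map]; omega)]
        conv_lhs => rw [show ((0 : Int), jolt_size)
          = ((0 : Int), ((greedy jolt_size.toNat (dstr num_str)).length : Int)) by
            rw [greedy_length, hkr]]
        rw [pow_fold]
        simp only [zero_add]
        rfl
      · -- jolt_size = len + 1 : every digit is kept
        have hkeq : jolt_size = (num_str.toList.length : Int) + 1 := by omega
        rw [PySem.List.pyRange_one_cons (by omega : (0 : Int) < jolt_size), List.foldl_cons]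
        dsimp only
        have hr1 : PySem.Str.len num_str - (jolt_size - 0) = -1 := by rw [hstr]; omega
        rw [hr1]
        have hfm0 : find_max_digit num_str (-1) (-1) (-1) = (0, -1) := by
          unfold find_max_digit
          rw [PySem.List.pyRange_neg_one_eq_nil le_rfl]
          rfl
        rw [hfm0]
        dsimp only
        simp only [List.nil_append]
        have houter := outer_loop num_str jolt_size hdig (by omega) num_str.toList.length
          [(0 : Int)] (-1) (by norm_num) (by omega)
        rw [show jolt_size - ((num_str.toList.length : Nat) : Int) = 0 + 1 by omega] at houter
        rw [houter]
        have harec := arec_greedy (dstr num_str) hx num_str.toList.length (-1) (by norm_num)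
          (by push_cast; omega)
        rw [show ((-1 : Int) + 1).toNat = 0 from rfl, List.drop_zero] at harec
        rw [harec, ← hxlen, greedy_all]
        rw [henum, runStack_nopop jolt_size _ []
          (by simp only [List.length_nil, List.length_map]; push_cast; omega)]
        simp only [List.append_nil, List.reverse_reverse]
        rw [List.take_of_length_le (by rw [List.length_map]; omega)]
        simp only [List.singleton_append]
        conv_lhs => rw [show ((0 : Int), jolt_size)
          = ((0 : Int), (((0 : Int) :: dstr num_str).length : Int)) by
            rw [List.length_cons, hxlen]; rw [hkeq]; push_cast; ring]
        rw [pow_fold]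
        have : horner ((0 : Int) :: dstr num_str) 0 = horner (dstr num_str) 0 := by
          simp [horner]
        rw [this]
        simp only [zero_add]
        rfl

    · -- len + 2 ≤ jolt_size ≤ 2*len + 1, wrapped tail all '0' (since ¬D_): both equal int(num_str)
      have hz : ∀ c ∈ num_str.toList.drop
          (2 * num_str.toList.length + 1 - jolt_size.toNat), c = '0' := by
        intro c hc
        by_contra hne
        exact hnd ⟨by omega, c, hc, hne⟩
      rw [band_eval num_str jolt_size hdig (by omega) (by omega)]
      rw [alt_nopop num_str jolt_size hdig (by omega) (by omega)]
      rw [band_split num_str jolt_size (by omega)]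
      rw [horner_append]
      have hTzero : horner ((dstr num_str).drop
          (2 * num_str.toList.length + 1 - jolt_size.toNat)) 0 = 0 := by
        apply horner_of_zeros
        intro x hxm
        rw [show (dstr num_str).drop (2 * num_str.toList.length + 1 - jolt_size.toNat)
            = (num_str.toList.drop (2 * num_str.toList.length + 1 - jolt_size.toNat)).map dv
            from (List.map_drop).symm] at hxm
        obtain ⟨c, hcmem, rfl⟩ := List.mem_map.1 hxm
        rw [hz c hcmem]
        decide
      rw [hTzero]

set_option maxRecDepth 11000 in
theorem largest_joltage_changed : Claim_changed_largest_joltage := by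
  unfold Claim_changed_largest_joltage
  refine ⟨by decide, by decide, ?_, ?_, ?_, by decide⟩
  · show D_largest_joltage "1" 3
    have h1 : ("1" : String).toList = ['1'] := rfl
    refine ⟨by rw [h1]; norm_num, '1', ?_, by decide⟩
    rw [h1]
    rw [show 2 * (['1'] : List Char).length + 1 - (3 : Int).toNat = 0 by norm_num]
    simp
  · show largest_joltage "1" 3 = (11 : Int)
    decide
  · show largest_joltage_alt "1" 3 = (1 : Int)
    decide


theorem largest_joltage_tight : Claim_exact_largest_joltage := by
  intro num_str jolt_size hdom hpre hD
  obtain ⟨hband, c0, hc0mem, hc0ne⟩ := hD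
  obtain ⟨hdig0, hk2⟩ := hpre.resolve_left (by omega)
  have hdig : ∀ c ∈ num_str.toList, PySem.Chars.isdigit c = true := by
    simpa [List.all_eq_true] using hdig0
  have hxlen : (dstr num_str).length = num_str.toList.length := by simp [dstr]
  have hx : ∀ x ∈ dstr num_str, 0 ≤ x := by
    intro x hxm
    obtain ⟨c, hc, rfl⟩ := List.mem_map.1 hxm
    have hd := hdig c hc
    simp [PySem.Chars.isdigit, Char.le_def, UInt32.le_iff_toNat_le] at hd
    have h1 : 48 ≤ c.toNat := hd.1
    unfold dv
    omega
  rw [band_eval num_str jolt_size hdig hband hk2]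
  rw [alt_nopop num_str jolt_size hdig (by omega) (by omega)]
  rw [band_split num_str jolt_size (by omega)]
  rw [horner_append]
  have hTnn : ∀ x ∈ (dstr num_str).drop
      (2 * num_str.toList.length + 1 - jolt_size.toNat), 0 ≤ x :=
    fun x hxm => hx x (List.mem_of_mem_drop hxm)
  have hmem' : dv c0 ∈ (dstr num_str).drop
      (2 * num_str.toList.length + 1 - jolt_size.toNat) := by
    rw [show (dstr num_str).drop (2 * num_str.toList.length + 1 - jolt_size.toNat)
        = (num_str.toList.drop (2 * num_str.toList.length + 1 - jolt_size.toNat)).map dv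
        from (List.map_drop).symm]
    exact List.mem_map_of_mem hc0mem
  have hc0dig : PySem.Chars.isdigit c0 = true := hdig c0 (List.mem_of_mem_drop hc0mem)
  have hTpos : 0 < horner ((dstr num_str).drop
      (2 * num_str.toList.length + 1 - jolt_size.toNat)) 0 :=
    horner_pos _ hTnn 0 le_rfl
      (Or.inr ⟨dv c0, hmem', by have := dv_pos_of_ne_zero c0 hc0dig hc0ne; omega⟩)
  have hHnn : 0 ≤ horner (dstr num_str) 0 := horner_ge_init _ hx 0 le_rfl
  rw [horner_shift (dstr num_str)]
  have hpow : 0 < (10 : Int) ^ (dstr num_str).length := by positivity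
  have hprod := mul_pos hTpos hpow
  intro heq
  omega
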